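-- pv_equiv track=rewrite | github.com/PKUFlyingPig/CS61A | exams/61a-su20-mt-solution/q6/q6.py | copycat
-- ===== SOURCE A (Python) =====
-- def copycat(lst1, lst2):
--     """
--     Write a function `copycat` that takes in two lists.
--         `lst1` is a list of strings
--         `lst2` is a list of integers
--
--     It returns a new list where every element from `lst1` is copied the
--     number of times as the corresponding element in `lst2`. If the number
--     of times to be copied is negative (-k), then it removes the previous
--     k elements added.
--
--     Note 1: `lst1` and `lst2` do not have to be the same length, simply ignore
--     any extra elements in the longer list.
--
--     Note 2: you can assume that you will never be asked to delete more
--     elements than exist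
--
--
--     >>> copycat(['a', 'b', 'c'], [1, 2, 3])
--     ['a', 'b', 'b', 'c', 'c', 'c']
--     >>> copycat(['a', 'b', 'c'], [3])
--     ['a', 'a', 'a']
--     >>> copycat(['a', 'b', 'c'], [0, 2, 0])
--     ['b', 'b']
--     >>> copycat([], [1,2,3])
--     []
--     >>> copycat(['a', 'b', 'c'], [1, -1, 3])
--     ['c', 'c', 'c']
--     """
--     def copycat_helper(lst1, lst2, lst_so_far):
--         if len(lst1) == 0 or len(lst2) == 0:
--             return lst_so_far
--         if lst2[0] >= 0:
--             lst_so_far = lst_so_far + [lst1[0] for _ in range(lst2[0])]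
--         else:
--             lst_so_far = lst_so_far[:lst2[0]]
--         return copycat_helper(lst1[1:], lst2[1:], lst_so_far)
--     return copycat_helper(lst1, lst2, [])
-- ===== SOURCE B (Python) =====
-- def copycat(lst1, lst2):
--     # Single iterative pass: extend with k copies, or delete the last -k
--     # elements in place for negative k. O(n + output) instead of A's
--     # quadratic re-copying of the accumulator.
--     res = []
--     for s, k in zip(lst1, lst2):
--         if k >= 0:
--             res.extend([s] * k)
--         else:
--             del res[k:]
--     return res
-- ===== Notes on version B (the rewrite author's own statement) =====
-- stated objective: faster
-- what changed: Replaced the tail-recursive helper that rebuilds the accumulator with 'lst_so_far + [...]' / slicing at every step by a single iterative zip loop mutating one result list in place (extend for nonnegative k, del res[k:] for negative k).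
import Mathlib
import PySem

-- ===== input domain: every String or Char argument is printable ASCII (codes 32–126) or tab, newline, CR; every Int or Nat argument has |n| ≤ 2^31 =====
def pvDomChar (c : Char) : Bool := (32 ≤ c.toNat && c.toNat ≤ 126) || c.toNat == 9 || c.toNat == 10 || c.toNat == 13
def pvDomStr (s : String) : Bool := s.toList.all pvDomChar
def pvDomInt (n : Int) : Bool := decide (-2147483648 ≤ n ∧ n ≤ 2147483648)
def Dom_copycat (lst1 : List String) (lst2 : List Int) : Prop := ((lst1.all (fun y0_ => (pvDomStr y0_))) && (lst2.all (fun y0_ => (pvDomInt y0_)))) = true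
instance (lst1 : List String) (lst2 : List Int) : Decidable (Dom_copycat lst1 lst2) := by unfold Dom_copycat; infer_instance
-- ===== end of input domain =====

-- B replaces A's accumulator-rebuilding recursion by one iterative pass (extend / delete-tail); faster asymptotically in Python, return value identical.

-- ===== PORT A =====
-- A's inner recursive helper, step for step.
def copycatHelper (lst1 : List String) (lst2 : List Int) (lstSoFar : List String) : List String :=
  match lst1, lst2 with
  | [], _ => lstSoFar
  | _, [] => lstSoFar
  | x :: xs, k :: ks =>
    if k ≥ 0 then
      -- lst_so_far + [lst1[0] for _ in range(lst2[0])]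
      copycatHelper xs ks (lstSoFar ++ (PySem.List.pyRange 0 k 1).map (fun _ => x))
    else
      -- lst_so_far[:lst2[0]]
      copycatHelper xs ks (PySem.List.slice lstSoFar none (some k))

def copycat (lst1 : List String) (lst2 : List Int) : List String :=
  copycatHelper lst1 lst2 []

-- ===== PORT B =====
-- One fold over zip lst1 lst2; `res.extend([s] * k)` is `++ replicate`,
-- `del res[k:]` (k < 0) keeps the first len+k elements, clamped at 0 — exact.
def copycat_alt (lst1 : List String) (lst2 : List Int) : List String :=
  (lst1.zip lst2).foldl
    (fun res sk =>
      if sk.2 ≥ 0 then res ++ List.replicate sk.2.toNat sk.1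
      else res.take ((res.length : Int) + sk.2).toNat)
    []

-- ===== PRECONDITION & SPEC =====
def Spec_copycat (lst1 : List String) (lst2 : List Int) (out : List String) : Prop := out = copycat_alt lst1 lst2
instance (lst1 : List String) (lst2 : List Int) (out : List String) : Decidable (Spec_copycat lst1 lst2 out) := by unfold Spec_copycat; infer_instance

-- ===== CLAIM (what is proved, stated in full; the proofs are below) =====
def Claim_equal_copycat : Prop := ∀ (lst1 : List String) (lst2 : List Int), Dom_copycat lst1 lst2 → Spec_copycat lst1 lst2 (copycat lst1 lst2)

-- ===== LEMMAS AND PROOFS =====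

-- A's list comprehension over range(k) is k copies of x.
theorem pyRange_map_const (k : Int) (x : String) :
    (PySem.List.pyRange 0 k 1).map (fun _ => x) = List.replicate k.toNat x := by
  rw [PySem.List.pyRange_one, List.map_map]
  simp [List.eq_replicate_iff]

-- A's slice acc[:k] for k < 0 equals B's take (len + k).toNat.
theorem slice_neg_eq_take (acc : List String) (k : Int) (hk : k < 0) :
    PySem.List.slice acc none (some k) = acc.take ((acc.length : Int) + k).toNat := by
  simp only [PySem.List.slice, PySem.List.clampIdx]
  split_ifs with h1 <;> simp_all <;> omega

-- The recursion equals the fold, for every accumulator.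
theorem helper_eq_foldl (lst1 : List String) (lst2 : List Int) (acc : List String) :
    copycatHelper lst1 lst2 acc =
      (lst1.zip lst2).foldl
        (fun res sk =>
          if sk.2 ≥ 0 then res ++ List.replicate sk.2.toNat sk.1
          else res.take ((res.length : Int) + sk.2).toNat) acc := by
  induction lst1 generalizing lst2 acc with
  | nil => simp [copycatHelper]
  | cons x xs ih =>
    cases lst2 with
    | nil => simp [copycatHelper]
    | cons k ks =>
      rw [copycatHelper]
      by_cases hk : k ≥ 0
      · rw [if_pos hk, ih, pyRange_map_const k x]
        simp [hk]
      · rw [if_neg hk, ih, slice_neg_eq_take acc k (by omega)]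
        simp [hk]

-- ===== VERDICT (by name: the statement is the Claim_ definition above) =====
theorem copycat_spec : Claim_equal_copycat := by
  intro lst1 lst2 _
  unfold Spec_copycat copycat copycat_alt
  exact helper_eq_foldl lst1 lst2 []
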